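-- pv_equiv track=rewrite | github.com/blhua/conserved_epitopes | get_conserved_epitopes.py | get_epitopes
-- ===== SOURCE A (Python) =====
-- def get_epitopes(sequence):
--     epitopes=[]
--
--     for i in range(8,12):
--
--         for j in range(len(sequence)-i):
--             epitope=sequence[j:j+i]
--             if 'X' not in epitope:
--                 epitopes.append(epitope)
--
--     return epitopes
-- ===== SOURCE B (Python) =====
-- def get_epitopes(sequence):
--     # Split the usable part of the sequence (A never uses the last character)
--     # into maximal 'X'-free segments, then emit every full window per segment:
--     # no per-window 'X' membership scan is needed.
--     segments = sequence[:-1].split('X')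
--     epitopes = []
--     for i in range(8, 12):
--         for seg in segments:
--             for k in range(len(seg) - i + 1):
--                 epitopes.append(seg[k:k + i])
--     return epitopes
-- ===== Notes on version B (the rewrite author's own statement) =====
-- stated objective: alternative
-- what changed: B splits the sequence once into maximal X-free segments and emits every full window of each segment, instead of testing 'X' membership on every window of the whole sequence.
import Mathlib
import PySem

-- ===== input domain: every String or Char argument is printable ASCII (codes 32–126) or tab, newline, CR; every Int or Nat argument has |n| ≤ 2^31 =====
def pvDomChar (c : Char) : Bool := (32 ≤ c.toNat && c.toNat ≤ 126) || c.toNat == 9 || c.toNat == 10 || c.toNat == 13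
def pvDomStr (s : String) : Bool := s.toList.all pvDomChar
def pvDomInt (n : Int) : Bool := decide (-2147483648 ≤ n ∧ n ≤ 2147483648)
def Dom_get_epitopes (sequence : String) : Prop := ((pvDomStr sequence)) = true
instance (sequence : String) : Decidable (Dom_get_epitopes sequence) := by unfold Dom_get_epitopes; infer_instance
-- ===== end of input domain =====

-- B replaces A's per-window 'X'-membership scan by a single split into maximal
-- X-free segments whose full windows are emitted directly (objective: alternative).

-- ===== PORT A =====
def get_epitopes (sequence : String) : List String :=
  (PySem.List.pyRange 8 12).foldl (fun epitopes i =>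
    (PySem.List.pyRange 0 ((PySem.Str.len sequence : Int) - i)).foldl (fun epitopes j =>
      let epitope := PySem.List.slice sequence.toList (some j) (some (j + i))
      if PySem.Chars.isIn ['X'] epitope then epitopes
      else epitopes ++ [String.ofList epitope]) epitopes) []

-- ===== PORT B =====
def get_epitopes_alt (sequence : String) : List String :=
  let segments := (PySem.List.slice sequence.toList none (some (-1))).splitOn 'X'
  (PySem.List.pyRange 8 12).foldl (fun epitopes i =>
    segments.foldl (fun epitopes seg =>
      (PySem.List.pyRange 0 ((seg.length : Int) - i + 1)).foldl (fun epitopes k =>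
        epitopes ++ [String.ofList (PySem.List.slice seg (some k) (some (k + i)))]) epitopes) epitopes) []

-- ===== PRECONDITION & SPEC =====
def Spec_get_epitopes (sequence : String) (out : List String) : Prop := out = get_epitopes_alt sequence
instance (sequence : String) (out : List String) : Decidable (Spec_get_epitopes sequence out) := by unfold Spec_get_epitopes; infer_instance

-- ===== CLAIM (what is proved, stated in full; the proofs are below) =====
def Claim_equal_get_epitopes : Prop := ∀ (sequence : String), Dom_get_epitopes sequence → Spec_get_epitopes sequence (get_epitopes sequence)

-- ===== LEMMAS AND PROOFS =====

-- A's X-free full windows of length i over t, in position order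
def pvChunk (i : Nat) (t : List Char) : List (List Char) :=
  ((List.range (t.length + 1 - i)).filter
    (fun j => !(decide ('X' ∈ (t.drop j).take i)))).map (fun j => (t.drop j).take i)

-- B's full windows of length i over a list of segments
def pvSegwins (i : Nat) (segs : List (List Char)) : List (List Char) :=
  segs.flatMap (fun seg => (List.range (seg.length + 1 - i)).map (fun k => (seg.drop k).take i))

lemma pv_isIn_single (c : Char) (l : List Char) :
    PySem.Chars.isIn [c] l = decide (c ∈ l) := by
  have hiff : [c] <:+: l ↔ c ∈ l := by
    constructor
    · intro h; exact List.singleton_sublist.mp h.sublist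
    · intro h
      obtain ⟨u, v, rfl⟩ := List.append_of_mem h
      exact ⟨u, v, by simp⟩
  have h1 : PySem.Chars.isIn [c] l = true ↔ c ∈ l :=
    (PySem.Chars.isIn_iff_infix [c] l).trans hiff
  by_cases h : c ∈ l
  · simp [h, h1.mpr h]
  · simp only [h, decide_false]
    exact Bool.eq_false_iff.mpr (fun ht => h (h1.mp ht))

lemma pv_pyRangeSub (n i : Nat) :
    PySem.List.pyRange 0 ((n : Int) - (i : Int)) =
      List.map (fun k : Nat => (k : Int)) (List.range (n - i)) := by
  by_cases h : i ≤ n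
  · have hc : (n : Int) - (i : Int) = ((n - i : Nat) : Int) := by omega
    rw [hc, PySem.List.pyRange_zero_natCast]
  · have h1 : n - i = 0 := by omega
    have h2 : (n : Int) - (i : Int) ≤ 0 := by omega
    rw [h1]
    simp [PySem.List.pyRange]
    omega

lemma pv_winEq (s : List Char) (i j : Nat) (h : j + i < s.length) :
    (s.drop j).take i = (s.dropLast.drop j).take i := by
  rw [List.dropLast_eq_take, List.drop_take, List.take_take]
  congr 1
  omega

lemma pv_noX_take_iff (r : List Char) (m : Nat) (hm : m ≤ r.length) :
    'X' ∈ r.take m ↔ (r.takeWhile (fun a => !(a == 'X'))).length < m := by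
  induction r generalizing m with
  | nil => simp at hm; simp [hm]
  | cons c r ih =>
    cases m with
    | zero => simp
    | succ m =>
      by_cases hc : c = 'X'
      · subst hc; simp [List.takeWhile]
      · have hc' : (c == 'X') = false := by simpa using hc
        have hm' : m ≤ r.length := by simpa using hm
        simp [List.takeWhile, hc', Ne.symm hc, ih m hm']

lemma pv_head_splitOnP (p : Char → Bool) (r : List Char) :
    (List.splitOnP p r).head? = some (r.takeWhile (fun a => !p a)) := by
  induction r with
  | nil => simp [List.splitOnP_nil]
  | cons c r ih =>
    rw [List.splitOnP_cons]
    by_cases hc : p c = true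
    · simp [hc, List.takeWhile]
    · have hc' : p c = false := by simpa using hc
      obtain ⟨h, tl, e⟩ : ∃ h tl, List.splitOnP p r = h :: tl := by
        cases hsp : List.splitOnP p r with
        | nil => exact absurd hsp (List.splitOnP_ne_nil p r)
        | cons a b => exact ⟨a, b, rfl⟩
      rw [e] at ih ⊢
      simp at ih
      simp [hc', List.takeWhile, ih]

-- prepending one char: the window at position 0 is kept iff it is X-free
lemma pv_chunk_cons_of_mem (i' : Nat) (c : Char) (r : List Char)
    (hX : 'X' ∈ (c :: r).take (i' + 1)) (hle : i' ≤ r.length) :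
    pvChunk (i' + 1) (c :: r) = pvChunk (i' + 1) r := by
  have e2 : (c :: r).length + 1 - (i' + 1) = (r.length + 1 - (i' + 1)) + 1 := by
    simp only [List.length_cons]; omega
  unfold pvChunk
  have hXd : decide ('X' ∈ (((c :: r).drop 0).take (i' + 1))) = true := by
    simp only [List.drop_zero]; exact decide_eq_true hX
  rw [e2, List.range_succ_eq_map, List.filter_cons]
  rw [show (!decide ('X' ∈ (((c :: r).drop 0).take (i' + 1)))) = false from by
    rw [hXd]; rfl]
  rw [if_neg Bool.false_ne_true]
  simp [List.filter_map, List.map_map, Function.comp_def]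
  try rfl

lemma pv_chunk_cons_of_free (i' : Nat) (c : Char) (r : List Char)
    (hX : ¬ ('X' ∈ (c :: r).take (i' + 1))) (hle : i' ≤ r.length) :
    pvChunk (i' + 1) (c :: r) = ((c :: r).take (i' + 1)) :: pvChunk (i' + 1) r := by
  have e2 : (c :: r).length + 1 - (i' + 1) = (r.length + 1 - (i' + 1)) + 1 := by
    simp only [List.length_cons]; omega
  unfold pvChunk
  have hXd : decide ('X' ∈ (((c :: r).drop 0).take (i' + 1))) = false := by
    simp only [List.drop_zero]; exact decide_eq_false hX
  rw [e2, List.range_succ_eq_map, List.filter_cons]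
  rw [show (!decide ('X' ∈ (((c :: r).drop 0).take (i' + 1)))) = true from by
    rw [hXd]; rfl]
  rw [if_pos rfl]
  simp [List.filter_map, List.map_map, Function.comp_def]
  try rfl

-- the heart: per window length, B's segment windows are exactly A's X-free windows
lemma pv_key (i : Nat) (hi : 1 ≤ i) (t : List Char) :
    pvSegwins i (t.splitOn 'X') = pvChunk i t := by
  induction t with
  | nil =>
    have h0 : 1 - i = 0 := by omega
    simp [List.splitOn, List.splitOnP_nil, pvSegwins, pvChunk, h0]
  | cons c r ih =>
    obtain ⟨i', rfl⟩ : ∃ i', i = i' + 1 := ⟨i - 1, by omega⟩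
    by_cases hc : c = 'X'
    · subst hc
      rw [List.splitOn, List.splitOnP_cons]
      simp only [BEq.rfl, if_true]
      have hL : pvSegwins (i' + 1) ([] :: List.splitOnP (fun x => x == 'X') r) =
          pvSegwins (i' + 1) (r.splitOn 'X') := by
        simp [pvSegwins, List.splitOn]
      rw [hL, ih]
      by_cases hbig : r.length < i'
      · simp [pvChunk, show r.length + 1 - i' = 0 from by omega,
          show r.length - i' = 0 from by omega]
      · exact (pv_chunk_cons_of_mem i' 'X' r (by simp) (by omega)).symm
    · rw [List.splitOn, List.splitOnP_cons]
      have hc' : (c == 'X') = false := by simpa using hc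
      rw [if_neg (by simp [hc'])]
      obtain ⟨h, tl, e⟩ : ∃ h tl, List.splitOnP (fun x => x == 'X') r = h :: tl := by
        cases hsp : List.splitOnP (fun x => x == 'X') r with
        | nil => exact absurd hsp (List.splitOnP_ne_nil _ r)
        | cons a b => exact ⟨a, b, rfl⟩
      have hh : h = r.takeWhile (fun a => !(a == 'X')) := by
        have hhd := pv_head_splitOnP (fun x => x == 'X') r
        rw [e] at hhd; simpa using hhd
      have hpre : h <+: r := hh ▸ List.takeWhile_prefix _
      have hhlen : h.length ≤ r.length := hpre.length_le
      have ihe : pvSegwins (i' + 1) (h :: tl) = pvChunk (i' + 1) r := by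
        have hsp : r.splitOn 'X' = h :: tl := by rw [List.splitOn, e]
        rw [← hsp, ih]
      rw [e, List.modifyHead_cons]
      by_cases hfit : i' ≤ h.length
      · -- the head window fits inside the first segment, hence is X-free
        have hnoX : ¬ ('X' ∈ r.take i') := by
          rw [pv_noX_take_iff r i' (by omega), ← hh]; omega
        have htake : r.take i' = h.take i' := by
          obtain ⟨u, rfl⟩ := hpre
          exact List.take_append_of_le_length (by omega)
        have e1 : (c :: h).length + 1 - (i' + 1) = (h.length + 1 - (i' + 1)) + 1 := by
          simp only [List.length_cons]; omega
        have hsw : pvSegwins (i' + 1) ((c :: h) :: tl) =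
            (c :: h.take i') :: pvSegwins (i' + 1) (h :: tl) := by
          simp only [pvSegwins, List.flatMap_cons, e1, List.range_succ_eq_map]
          simp [List.map_map, Function.comp_def]
        have hfree : ¬ ('X' ∈ (c :: r).take (i' + 1)) := by
          simp only [List.take_succ_cons, List.mem_cons]
          rintro (h1 | h1)
          · exact hc h1.symm
          · exact hnoX h1
        rw [hsw, ihe, pv_chunk_cons_of_free i' c r hfree (by omega),
            List.take_succ_cons, htake]
      · -- the head window does not fit: no window of c::h, and (if present) A's
        -- window at 0 crosses an X
        have hsw : pvSegwins (i' + 1) ((c :: h) :: tl) = pvSegwins (i' + 1) (h :: tl) := by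
          simp [pvSegwins, show h.length + 1 - i' = 0 from by omega,
            show h.length - i' = 0 from by omega]
        rw [hsw, ihe]
        by_cases hbig : r.length < i'
        · simp [pvChunk, show r.length + 1 - i' = 0 from by omega,
            show r.length - i' = 0 from by omega]
        · have hX : 'X' ∈ (c :: r).take (i' + 1) := by
            simp only [List.take_succ_cons, List.mem_cons]
            refine Or.inr ?_
            rw [pv_noX_take_iff r i' (by omega), ← hh]; omega
          exact (pv_chunk_cons_of_mem i' c r hX (by omega)).symm

-- A's inner loop computes the X-free windows of the (last-character-free) prefix
lemma pv_innerA (s : List Char) (i : Int) (iN : Nat) (hcast : i = (iN : Int))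
    (hi : 1 ≤ iN) (acc : List String) :
    (PySem.List.pyRange 0 ((s.length : Int) - i)).foldl (fun epitopes j =>
      if PySem.Chars.isIn ['X'] (PySem.List.slice s (some j) (some (j + i)))
      then epitopes
      else epitopes ++ [String.ofList (PySem.List.slice s (some j) (some (j + i)))]) acc
    = acc ++ (pvChunk iN s.dropLast).map String.ofList := by
  subst hcast
  rw [pv_pyRangeSub s.length iN]
  simp only [List.foldl_map, PySem.List.slice_natCast_add]
  have hflip : (fun (ep : List String) (j : Nat) =>
      if PySem.Chars.isIn ['X'] (List.take iN (List.drop j s)) then ep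
      else ep ++ [String.ofList (List.take iN (List.drop j s))]) =
      (fun ep j => if (!(decide ('X' ∈ List.take iN (List.drop j s)))) = true
        then ep ++ [String.ofList (List.take iN (List.drop j s))] else ep) := by
    funext ep j
    rw [pv_isIn_single]
    cases hd : decide ('X' ∈ List.take iN (List.drop j s)) <;> simp
  rw [hflip, PySem.List.foldl_append_if]
  congr 1
  have hrange : s.length - iN = s.dropLast.length + 1 - iN := by
    rw [List.length_dropLast]; omega
  have hwin : ∀ j ∈ List.range (s.length - iN),
      List.take iN (List.drop j s) = List.take iN (List.drop j s.dropLast) := by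
    intro j hj
    rw [List.mem_range] at hj
    exact pv_winEq s iN j (by omega)
  unfold pvChunk
  rw [← hrange]
  rw [List.filter_congr (by intro j hj; rw [hwin j hj])]
  rw [List.map_map]
  apply List.map_congr_left
  intro j hj
  simp only [Function.comp_def]
  rw [hwin j (List.mem_filter.mp hj).1]

-- B's two inner loops emit every full window of every segment
lemma pv_innerB (i : Int) (iN : Nat) (hcast : i = (iN : Int))
    (segs : List (List Char)) (acc : List String) :
    segs.foldl (fun epitopes seg =>
      (PySem.List.pyRange 0 ((seg.length : Int) - i + 1)).foldl (fun epitopes k =>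
        epitopes ++ [String.ofList (PySem.List.slice seg (some k) (some (k + i)))])
        epitopes) acc
    = acc ++ (pvSegwins iN segs).map String.ofList := by
  subst hcast
  induction segs generalizing acc with
  | nil => simp [pvSegwins]
  | cons seg rest ih =>
    rw [List.foldl_cons, ih]
    have hz : (seg.length : Int) - (iN : Int) + 1 =
        ((seg.length + 1 : Nat) : Int) - (iN : Int) := by push_cast; ring
    rw [hz, pv_pyRangeSub (seg.length + 1) iN]
    simp only [List.foldl_map, PySem.List.slice_natCast_add]
    rw [PySem.List.foldl_append_singleton_eq_map]
    simp [pvSegwins, List.map_map, Function.comp_def]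

-- ===== VERDICT (by name: the statement is the Claim_ definition above) =====
theorem get_epitopes_spec : Claim_equal_get_epitopes := by
  intro sequence _dom
  unfold Spec_get_epitopes
  simp only [get_epitopes, get_epitopes_alt]
  rw [show PySem.List.pyRange 8 12 = [8, 9, 10, 11] from by decide]
  simp only [List.foldl_cons, List.foldl_nil, PySem.Str.len_eq,
    PySem.List.slice_to_neg_one]
  rw [pv_innerA _ 8 8 (by norm_num) (by norm_num),
      pv_innerA _ 9 9 (by norm_num) (by norm_num),
      pv_innerA _ 10 10 (by norm_num) (by norm_num),
      pv_innerA _ 11 11 (by norm_num) (by norm_num),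
      pv_innerB 8 8 (by norm_num), pv_innerB 9 9 (by norm_num),
      pv_innerB 10 10 (by norm_num), pv_innerB 11 11 (by norm_num),
      pv_key 8 (by norm_num), pv_key 9 (by norm_num),
      pv_key 10 (by norm_num), pv_key 11 (by norm_num)]
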